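-- pv_equiv track=rewrite | github.com/kamusone/Indeed_project | indeed_script_02.py | return_niveau_text
-- ===== SOURCE A (Python) =====
-- list_debutant =["STAGE","STAGIAIRE","INTERNSHIP","TRAINEE", "ALTERNANCE"]
--
-- def return_niveau_text(descreption, titre):
--     if 'JUNIOR' in descreption or 'JUNIOR' in titre:
--         return 'JUNIOR'
--     elif 'SENIOR' in descreption or 'SENIOR' in titre:
--         return 'SENIOR'
--     elif 'DEBUTANT' in descreption or 'DEBUTANT' in titre:
--         return 'DEBUTANT'
--     else:
--         for niveau in list_debutant:
--             if niveau in descreption or niveau in titre: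
--                 return "STAGIAIRE"
--         else:
--             pass
-- ===== SOURCE B (Python) =====
-- # B: single forward scan over the text positions keeping the minimum matching
-- # rank (an accumulator), instead of A's per-keyword substring-membership cascade.
-- _KEYWORDS = [
--     ("JUNIOR", 0), ("SENIOR", 1), ("DEBUTANT", 2),
--     ("STAGE", 3), ("STAGIAIRE", 3), ("INTERNSHIP", 3),
--     ("TRAINEE", 3), ("ALTERNANCE", 3),
-- ]
-- _LABELS = ["JUNIOR", "SENIOR", "DEBUTANT", "STAGIAIRE"]
--
-- def _scan_text(best, text):
--     for i in range(len(text)):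
--         for kw, rank in _KEYWORDS:
--             if text[i:i+len(kw)] == kw:
--                 best = min(best, rank)
--     return best
--
-- def return_niveau_text(descreption, titre):
--     best = _scan_text(_scan_text(4, descreption), titre)
--     return _LABELS[best] if best < 4 else None
-- ===== Notes on version B (the rewrite author's own statement) =====
-- stated objective: alternative
-- what changed: Instead of A's per-keyword substring-membership tests in priority order, B makes a single forward scan over every position of each input string, matching all keywords at each position and keeping the minimum priority rank in an accumulator, then maps the final rank to its label.
import Mathlib
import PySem

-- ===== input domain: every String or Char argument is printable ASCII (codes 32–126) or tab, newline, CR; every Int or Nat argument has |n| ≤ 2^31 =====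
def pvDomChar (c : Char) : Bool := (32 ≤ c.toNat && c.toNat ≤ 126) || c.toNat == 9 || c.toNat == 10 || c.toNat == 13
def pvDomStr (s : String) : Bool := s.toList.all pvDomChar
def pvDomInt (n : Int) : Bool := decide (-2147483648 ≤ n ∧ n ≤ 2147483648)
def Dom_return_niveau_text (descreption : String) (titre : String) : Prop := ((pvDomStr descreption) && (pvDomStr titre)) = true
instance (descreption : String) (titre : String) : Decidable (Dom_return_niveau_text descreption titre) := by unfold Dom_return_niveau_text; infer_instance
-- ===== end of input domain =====

-- B replaces A's priority cascade of substring-membership tests by a single forward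
-- scan over every position of each string, keeping the minimum matching rank; objective: alternative.
-- ===== PORT A =====
def pvListDebutant : List String := ["STAGE", "STAGIAIRE", "INTERNSHIP", "TRAINEE", "ALTERNANCE"]

-- the trailing 'for niveau in list_debutant' loop of A
def pvLoopA (descreption : String) (titre : String) : List String → Option String
  | [] => none
  | niveau :: rest =>
    if PySem.Str.isIn niveau descreption || PySem.Str.isIn niveau titre then some "STAGIAIRE"
    else pvLoopA descreption titre rest

def return_niveau_text (descreption : String) (titre : String) : Option String :=
  if PySem.Str.isIn "JUNIOR" descreption || PySem.Str.isIn "JUNIOR" titre then some "JUNIOR"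
  else if PySem.Str.isIn "SENIOR" descreption || PySem.Str.isIn "SENIOR" titre then some "SENIOR"
  else if PySem.Str.isIn "DEBUTANT" descreption || PySem.Str.isIn "DEBUTANT" titre then some "DEBUTANT"
  else pvLoopA descreption titre pvListDebutant

-- ===== PORT B =====
-- keywords with their priority rank; strings handled as code-point lists (exact)
def pvKeywords : List (List Char × Nat) :=
  [("JUNIOR".toList, 0), ("SENIOR".toList, 1), ("DEBUTANT".toList, 2),
   ("STAGE".toList, 3), ("STAGIAIRE".toList, 3), ("INTERNSHIP".toList, 3),
   ("TRAINEE".toList, 3), ("ALTERNANCE".toList, 3)]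

def pvLabels : List String := ["JUNIOR", "SENIOR", "DEBUTANT", "STAGIAIRE"]

-- Source B's _scan_text: for i in range(len(text)): for kw, rank in _KEYWORDS:
--   if text[i:i+len(kw)] == kw: best = min(best, rank)
def pvScanText (best0 : Nat) (text : List Char) : Nat :=
  (PySem.List.pyRange 0 (text.length) 1).foldl (fun best i =>
    pvKeywords.foldl (fun best kr =>
      if PySem.List.slice text (some i) (some (i + (kr.1.length : Int))) = kr.1 then min best kr.2
      else best) best) best0

def return_niveau_text_alt (descreption : String) (titre : String) : Option String :=
  let best := pvScanText (pvScanText 4 descreption.toList) titre.toList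
  if best < 4 then pvLabels[best]? else none

-- ===== PRECONDITION & SPEC =====
def Spec_return_niveau_text (descreption : String) (titre : String) (out : Option String) : Prop := out = return_niveau_text_alt descreption titre
instance (descreption : String) (titre : String) (out : Option String) : Decidable (Spec_return_niveau_text descreption titre out) := by unfold Spec_return_niveau_text; infer_instance

-- ===== CLAIM (what is proved, stated in full; the proofs are below) =====
def Claim_equal_return_niveau_text : Prop := ∀ (descreption : String) (titre : String), Dom_return_niveau_text descreption titre → Spec_return_niveau_text descreption titre (return_niveau_text descreption titre)

-- ===== LEMMAS AND PROOFS =====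

-- minimum rank matching at position j (4 = nothing matches there)
def pvM (text : List Char) (j : Nat) : Nat :=
  if "JUNIOR".toList <+: text.drop j then 0
  else if "SENIOR".toList <+: text.drop j then 1
  else if "DEBUTANT".toList <+: text.drop j then 2
  else if "STAGE".toList <+: text.drop j then 3
  else if "STAGIAIRE".toList <+: text.drop j then 3
  else if "INTERNSHIP".toList <+: text.drop j then 3
  else if "TRAINEE".toList <+: text.drop j then 3
  else if "ALTERNANCE".toList <+: text.drop j then 3
  else 4

def pvCascade (x0 x1 x2 x3 : Bool) : Nat :=
  if x0 then 0 else if x1 then 1 else if x2 then 2 else if x3 then 3 else 4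

-- A's cascade value on a whole text
def pvV (text : List Char) : Nat :=
  pvCascade (PySem.Chars.isIn "JUNIOR".toList text) (PySem.Chars.isIn "SENIOR".toList text)
    (PySem.Chars.isIn "DEBUTANT".toList text)
    (PySem.Chars.isIn "STAGE".toList text || PySem.Chars.isIn "STAGIAIRE".toList text ||
     PySem.Chars.isIn "INTERNSHIP".toList text || PySem.Chars.isIn "TRAINEE".toList text ||
     PySem.Chars.isIn "ALTERNANCE".toList text)

lemma pvCond_iff (text : List Char) (j : Nat) (kw : List Char) :
    PySem.List.slice text (some (j : Int)) (some ((j : Int) + (kw.length : Int))) = kw ↔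
      kw <+: text.drop j := by
  rw [PySem.List.slice_natCast_add, List.prefix_iff_eq_take, eq_comm]

set_option maxHeartbeats 2000000 in
lemma pvInner_eq (text : List Char) (j : Nat) (b : Nat) :
    (pvKeywords.foldl (fun best kr =>
      if PySem.List.slice text (some (j : Int)) (some ((j : Int) + (kr.1.length : Int))) = kr.1
      then min best kr.2 else best) b) =
      (if pvM text j ≤ 3 then min b (pvM text j) else b) := by
  simp only [pvKeywords, List.foldl, pvCond_iff, pvM]
  split_ifs <;> omega

lemma pvFold_le_init (text : List Char) (l : List Nat) (b : Nat) :
    l.foldl (fun a j => if pvM text j ≤ 3 then min a (pvM text j) else a) b ≤ b := by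
  induction l generalizing b with
  | nil => simp
  | cons x xs ih =>
    refine le_trans (ih _) ?_
    dsimp only
    split_ifs <;> omega

lemma pvFold_le_mem (text : List Char) (l : List Nat) (b : Nat) {j : Nat} (hj : j ∈ l)
    (hm : pvM text j ≤ 3) :
    l.foldl (fun a j => if pvM text j ≤ 3 then min a (pvM text j) else a) b ≤ pvM text j := by
  induction l generalizing b with
  | nil => cases hj
  | cons x xs ih =>
    rcases List.mem_cons.mp hj with h | h
    · subst h
      rw [List.foldl_cons]
      refine le_trans (pvFold_le_init _ _ _) ?_
      dsimp only
      split_ifs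
      all_goals omega
    · exact ih _ h

lemma pvFold_lb (text : List Char) (l : List Nat) (b c : Nat)
    (h : ∀ j ∈ l, c ≤ pvM text j) (hb : c ≤ b) :
    c ≤ l.foldl (fun a j => if pvM text j ≤ 3 then min a (pvM text j) else a) b := by
  induction l generalizing b with
  | nil => exact hb
  | cons x xs ih =>
    refine ih _ (fun j hj => h j (List.mem_cons_of_mem _ hj)) ?_
    have := h x List.mem_cons_self
    dsimp only
    split_ifs <;> omega

lemma pvV_le_4 (text : List Char) : pvV text ≤ 4 := by
  unfold pvV pvCascade; split_ifs <;> omega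

lemma pvOcc_of_match {text kw : List Char} {j : Nat} (h : kw <+: text.drop j) :
    PySem.Chars.isIn kw text = true :=
  (PySem.Chars.exists_prefix_drop_iff_isIn kw text).mp ⟨j, h⟩

lemma pvM_ge_V (text : List Char) (j : Nat) : pvV text ≤ pvM text j := by
  unfold pvM
  split_ifs with h1 h2 h3 h4 h5 h6 h7 h8 <;>
    [have := pvOcc_of_match h1; have := pvOcc_of_match h2; have := pvOcc_of_match h3;
     have := pvOcc_of_match h4; have := pvOcc_of_match h5; have := pvOcc_of_match h6;
     have := pvOcc_of_match h7; have := pvOcc_of_match h8; skip] <;>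
    unfold pvV pvCascade <;> split_ifs <;> first | omega | simp_all

lemma pvPrefix_lt_length {text kw : List Char} {j : Nat} (hne : kw ≠ [])
    (h : kw <+: text.drop j) : j < text.length := by
  by_contra hj
  rw [List.drop_eq_nil_of_le (by omega)] at h
  exact hne (List.prefix_nil.mp h)

lemma pvM_le_of_match {text kw : List Char} {j : Nat} {r : Nat}
    (hmem : (kw, r) ∈ pvKeywords) (h : kw <+: text.drop j) : pvM text j ≤ r := by
  fin_cases hmem <;> unfold pvM <;> split_ifs <;>
    first | omega | exact absurd h ‹_›

lemma pvV_lt_4_exists (text : List Char) (h : pvV text < 4) :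
    ∃ j < text.length, pvM text j ≤ pvV text := by
  unfold pvV pvCascade at *
  split_ifs at * with h0 h1 h2 h3 <;> try omega
  · obtain ⟨j, hj⟩ := (PySem.Chars.exists_prefix_drop_iff_isIn _ _).mpr h0
    exact ⟨j, pvPrefix_lt_length (by decide) hj, pvM_le_of_match (by decide) hj⟩
  · obtain ⟨j, hj⟩ := (PySem.Chars.exists_prefix_drop_iff_isIn _ _).mpr h1
    exact ⟨j, pvPrefix_lt_length (by decide) hj, pvM_le_of_match (by decide) hj⟩
  · obtain ⟨j, hj⟩ := (PySem.Chars.exists_prefix_drop_iff_isIn _ _).mpr h2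
    exact ⟨j, pvPrefix_lt_length (by decide) hj, pvM_le_of_match (by decide) hj⟩
  · simp only [Bool.or_eq_true] at h3
    rcases h3 with (((hs | hs) | hs) | hs) | hs <;>
      obtain ⟨j, hj⟩ := (PySem.Chars.exists_prefix_drop_iff_isIn _ _).mpr hs <;>
      exact ⟨j, pvPrefix_lt_length (by decide) hj, pvM_le_of_match (by decide) hj⟩

lemma pvFoldl_ext {α β : Type} (f g : α → β → α) (b : α) (l : List β)
    (h : ∀ a x, f a x = g a x) : l.foldl f b = l.foldl g b := by
  induction l generalizing b with
  | nil => rfl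
  | cons x xs ih => rw [List.foldl_cons, List.foldl_cons, h]; exact ih _

lemma pvScan_eq_fold (b : Nat) (text : List Char) :
    pvScanText b text =
      (List.range text.length).foldl
        (fun a j => if pvM text j ≤ 3 then min a (pvM text j) else a) b := by
  unfold pvScanText
  rw [PySem.List.pyRange_one]
  simp only [Int.sub_zero, Int.toNat_natCast, List.foldl_map, zero_add]
  exact pvFoldl_ext _ _ _ _ (fun a j => pvInner_eq text j a)

lemma pvScan_val (b : Nat) (text : List Char) (hb : b ≤ 4) :
    pvScanText b text = min b (pvV text) := by
  rw [pvScan_eq_fold]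
  apply le_antisymm
  · refine le_min (pvFold_le_init _ _ _) ?_
    by_cases h4 : pvV text < 4
    · obtain ⟨j, hj, hm⟩ := pvV_lt_4_exists text h4
      exact le_trans
        (pvFold_le_mem _ _ _ (List.mem_range.mpr hj) (by omega)) hm
    · have h := pvV_le_4 text
      have he : pvV text = 4 := by omega
      rw [he]
      exact le_trans (pvFold_le_init _ _ _) hb
  · exact pvFold_lb _ _ _ _ (fun j _ => le_trans (min_le_right _ _) (pvM_ge_V text j))
      (min_le_left _ _)

lemma pvLoopA_eq (d t : String) :
    pvLoopA d t pvListDebutant =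
      (if (PySem.Str.isIn "STAGE" d || PySem.Str.isIn "STAGIAIRE" d ||
           PySem.Str.isIn "INTERNSHIP" d || PySem.Str.isIn "TRAINEE" d ||
           PySem.Str.isIn "ALTERNANCE" d) ||
          (PySem.Str.isIn "STAGE" t || PySem.Str.isIn "STAGIAIRE" t ||
           PySem.Str.isIn "INTERNSHIP" t || PySem.Str.isIn "TRAINEE" t ||
           PySem.Str.isIn "ALTERNANCE" t)
       then some "STAGIAIRE" else none) := by
  simp only [pvListDebutant, pvLoopA]
  split_ifs <;> simp_all

lemma pvMin_cascade (a0 a1 a2 a3 b0 b1 b2 b3 : Bool) :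
    min (pvCascade a0 a1 a2 a3) (pvCascade b0 b1 b2 b3) =
      pvCascade (a0 || b0) (a1 || b1) (a2 || b2) (a3 || b3) := by
  revert a0 a1 a2 a3 b0 b1 b2 b3; decide

lemma pvLabel_cascade (x0 x1 x2 x3 : Bool) :
    (if pvCascade x0 x1 x2 x3 < 4 then pvLabels[pvCascade x0 x1 x2 x3]? else none) =
      (if x0 then some "JUNIOR" else if x1 then some "SENIOR"
       else if x2 then some "DEBUTANT" else if x3 then some "STAGIAIRE" else none) := by
  revert x0 x1 x2 x3; decide

-- ===== VERDICT (by name: the statement is the Claim_ definition above) =====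
theorem return_niveau_text_spec : Claim_equal_return_niveau_text := by
  intro d t _
  unfold Spec_return_niveau_text return_niveau_text return_niveau_text_alt
  rw [pvScan_val 4 d.toList (by omega), Nat.min_eq_right (pvV_le_4 _),
      pvScan_val _ t.toList (pvV_le_4 _)]
  rw [pvLoopA_eq]
  unfold pvV
  rw [pvMin_cascade, pvLabel_cascade]
  simp only [PySem.Str.isIn_eq]
  rfl
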